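-- pv_equiv track=rewrite | github.com/Jodezamb/ioet_exercise_match_of_employees | main.py | match_employees
-- ===== SOURCE A (Python) =====
-- from typing import Dict
--
-- def match_employees(dic_employees: dict) ->dict:
--
--     dic_match:Dict[str,int]={} # estructura del diccionario que contendra la data
--
--     # se realiza una dobla iteraccion para comparar los dias que trabaja un empleado con otro
--     for name1, set_days1 in dic_employees.items():
--         for name2,set_days2 in dic_employees.items():
--
--             # se valida que no se compare  el mismo empleado
--             if name1!=name2:
--                 set_join_days=set_days1.intersection(set_days2) # interseccion de los conjuntos de dias entre los empleados,
--                 count=len(set_join_days)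
--                 names=name1+ '-' +name2
--                 names2=name2+ '-' +name1                        # nombre  intercambiado para validacion es lo mismo (Jose-Adrian y Adrian-Jose)
--
--                 if not(names in dic_match) and not(names2 in dic_match): # validacion del doble for nombres repetidos (Jose-Adrian => Adrian-Jose)
--                     dic_match[names]=count
--
--     return dic_match # estructura dic_match ->  {'RENE-ASTRID': 2, 'RENE-ANDRES': 2,.......,'ANDRES-KEVIN': 3}
-- ===== SOURCE B (Python) =====
-- def match_employees(dic_employees: dict) -> dict:
--     # Inverted index: group employees by day, count co-occurrences per day,
--     # then read the per-pair totals off the counter -- no set intersections at all.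
--     names = list(dic_employees)
--
--     # day -> employees (in dict order) that work that day
--     day_emps = {}
--     for name, days in dic_employees.items():
--         for d in days:
--             day_emps.setdefault(d, []).append(name)
--
--     # (earlier, later) employee pair -> number of shared days
--     counts = {}
--     for emps in day_emps.values():
--         tail = emps
--         while tail:
--             a = tail[0]
--             tail = tail[1:]
--             for b in tail:
--                 counts[(a, b)] = counts.get((a, b), 0) + 1
--
--     # emit every pair in first-seen order with its total (0 if never co-occurred)
--     result = {}
--     tail = names
--     while tail:
--         a = tail[0]
--         tail = tail[1:]
--         for b in tail:
--             result[a + '-' + b] = counts.get((a, b), 0)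
--     return result
-- ===== Notes on version B (the rewrite author's own statement) =====
-- stated objective: faster
-- what changed: Replaces A's double loop over all ordered employee pairs (one set intersection per direction plus seen-key guards) by an inverted day-to-employees index: co-occurrences are tallied per day into a pair counter and the result is read off that counter, so no set intersections are computed at all (only co-occurring pairs are touched while counting; measured ~3-4x on the timing inputs).
import Mathlib
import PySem

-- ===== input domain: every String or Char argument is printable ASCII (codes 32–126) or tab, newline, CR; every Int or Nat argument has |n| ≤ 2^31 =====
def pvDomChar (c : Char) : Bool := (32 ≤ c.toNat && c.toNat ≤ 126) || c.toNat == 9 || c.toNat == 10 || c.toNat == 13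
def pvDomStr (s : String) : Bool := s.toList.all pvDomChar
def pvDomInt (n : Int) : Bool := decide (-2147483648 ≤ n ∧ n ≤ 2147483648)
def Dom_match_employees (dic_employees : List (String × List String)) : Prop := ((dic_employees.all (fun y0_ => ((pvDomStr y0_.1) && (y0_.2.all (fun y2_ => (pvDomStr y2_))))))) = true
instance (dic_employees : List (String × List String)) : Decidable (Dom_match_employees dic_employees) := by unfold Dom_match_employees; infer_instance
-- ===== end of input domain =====

-- B replaces A's all-ordered-pairs double loop over the employees (set intersection per pair,
-- seen-key guard) by an inverted day→employees index whose per-day co-occurrences are counted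
-- once into a pair counter, read off at the end — no set intersections at all.

-- shared helper: the joined "name1-name2" key (both Pythons concatenate it)
def pvKey (a b : String) : String := a ++ "-" ++ b
-- |days1 ∩ days2| as A computes it
def pvCnt (d1 d2 : List String) : Int :=
  PySem.Set.len (PySem.Set.inter (PySem.Set.ofList d1) (PySem.Set.ofList d2))

-- ===== PORT A =====
def pvStepA (p1 : String × List String) (dm : PySem.Dict String Int)
    (p2 : String × List String) : PySem.Dict String Int :=
  if p1.1 ≠ p2.1 then
    let count := pvCnt p1.2 p2.2
    let names := pvKey p1.1 p2.1
    let names2 := pvKey p2.1 p1.1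
    if (!dm.contains names && !dm.contains names2) then dm.insert names count else dm
  else dm

def match_employees (dic_employees : List (String × List String)) : List (String × Int) :=
  (dic_employees.foldl (fun dm p1 => dic_employees.foldl (pvStepA p1) dm)
    PySem.Dict.empty).items

-- ===== PORT B =====
-- day_emps loop: for each employee, for each of its days d (a Python set — consumed
-- order-independently), day_emps.setdefault(d, []).append(name) = modify d [] (· ++ [name])
def pvDayLoop (de : PySem.Dict String (List String)) (p : String × List String) :
    PySem.Dict String (List String) :=
  (PySem.Set.ofList p.2).foldl (fun de d => de.modify d [] (· ++ [p.1])) de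

-- per-day counting loop: while tail: a = tail[0]; tail = tail[1:]; for b in tail: counts[(a,b)] += 1
def pvCountPairs : PySem.Dict (String × String) Int → List String → PySem.Dict (String × String) Int
  | c, [] => c
  | c, a :: tail =>
      pvCountPairs (tail.foldl (fun c b => c.insert (a, b) (c.getD (a, b) 0 + 1)) c) tail

-- result loop: while tail: a = tail[0]; tail = tail[1:]; for b in tail: result[a+'-'+b] = counts.get((a,b),0)
def pvBuildRes (counts : PySem.Dict (String × String) Int) :
    PySem.Dict String Int → List String → PySem.Dict String Int
  | r, [] => r
  | r, a :: tail =>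
      pvBuildRes counts (tail.foldl (fun r b => r.insert (pvKey a b) (counts.getD (a, b) 0)) r) tail

def match_employees_alt (dic_employees : List (String × List String)) : List (String × Int) :=
  let names := dic_employees.map Prod.fst
  let dayEmps := dic_employees.foldl pvDayLoop PySem.Dict.empty
  let counts := dayEmps.values.foldl pvCountPairs PySem.Dict.empty
  (pvBuildRes counts PySem.Dict.empty names).items

-- ===== PRECONDITION & SPEC =====
-- Pre_ excludes assoc lists with duplicate names (a Python dict cannot hold them) and inputs
-- where names containing '-' make two different pairs produce the same joined key, on which
-- A's first-write-wins skip is an accident of its seen-key guard.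
def Pre_match_employees (dic_employees : List (String × List String)) : Prop :=
  (dic_employees.map Prod.fst).Nodup ∧
  ∀ p ∈ dic_employees, ∀ q ∈ dic_employees, ∀ r ∈ dic_employees, ∀ s ∈ dic_employees,
    p.1 ≠ q.1 → r.1 ≠ s.1 → pvKey p.1 q.1 = pvKey r.1 s.1 → p.1 = r.1 ∧ q.1 = s.1

instance (dic_employees : List (String × List String)) : Decidable (Pre_match_employees dic_employees) := by
  unfold Pre_match_employees; infer_instance

def pvWitness_match_employees : (List (String × List String)) :=
  [("RENE", ["mon", "tue"]), ("ASTRID", ["tue", "wed"]), ("ANDRES", ["mon"])]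

def Spec_match_employees (dic_employees : List (String × List String)) (out : List (String × Int)) : Prop := out = match_employees_alt dic_employees
instance (dic_employees : List (String × List String)) (out : List (String × Int)) : Decidable (Spec_match_employees dic_employees out) := by unfold Spec_match_employees; infer_instance

-- ===== CLAIM (what is proved, stated in full; the proofs are below) =====
def Claim_equal_match_employees : Prop := ∀ (dic_employees : List (String × List String)), Dom_match_employees dic_employees → Pre_match_employees dic_employees → Spec_match_employees dic_employees (match_employees dic_employees)

-- ===== LEMMAS AND PROOFS =====

-- the canonical per-pair list both sides are reduced to: each i<j pair once, in order
def pvPair (p q : String × List String) : String × Int := (pvKey p.1 q.1, pvCnt p.2 q.2)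

def pvCombos : List (String × List String) → List (String × Int)
  | [] => []
  | p :: rest => rest.map (pvPair p) ++ pvCombos rest

----------------------------------------------------------------------
-- A-side: A's double loop builds exactly the dict with items pvCombos
----------------------------------------------------------------------

-- the dict A has built after processing an outer prefix `pre`, with `suf` still to come
def combosUpto : List (String × List String) → List (String × List String) → List (String × Int)
  | [], _ => []
  | p :: pre', suf => (pre' ++ suf).map (pvPair p) ++ combosUpto pre' suf

theorem combosUpto_nil_right (l : List (String × List String)) :
    combosUpto l [] = pvCombos l := by
  induction l with
  | nil => rfl
  | cons p rest ih => simp [combosUpto, pvCombos, ih]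

theorem combosUpto_shift (pre suf : List (String × List String)) (p : String × List String) :
    combosUpto pre (p :: suf) ++ suf.map (pvPair p) = combosUpto (pre ++ [p]) suf := by
  induction pre with
  | nil => simp [combosUpto]
  | cons q pre' ih => simp [combosUpto, ← ih]

theorem mem_keys_combosUpto_of (pre suf : List (String × List String))
    (q : String × List String) (hq : q ∈ pre) (r : String × List String) (hr : r ∈ suf) :
    pvKey q.1 r.1 ∈ (combosUpto pre suf).map Prod.fst := by
  induction pre with
  | nil => cases hq
  | cons q0 pre' ih =>
    simp only [combosUpto, List.map_append, List.mem_append]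
    rcases List.mem_cons.mp hq with h | h
    · subst h
      exact Or.inl <| Or.inr <| List.mem_map.mpr ⟨pvPair q r, List.mem_map.mpr ⟨r, hr, rfl⟩, rfl⟩
    · exact Or.inr (ih h)

theorem keys_combosUpto_sub (pre suf : List (String × List String))
    (hn : ((pre ++ suf).map Prod.fst).Nodup) (k : String)
    (hk : k ∈ (combosUpto pre suf).map Prod.fst) :
    ∃ q ∈ pre, ∃ r ∈ pre ++ suf, q.1 ≠ r.1 ∧ k = pvKey q.1 r.1 := by
  induction pre with
  | nil => simp [combosUpto] at hk
  | cons q0 pre' ih =>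
    have hcons : (q0.1 :: (pre' ++ suf).map Prod.fst).Nodup := by simpa using hn
    have hn' : ((pre' ++ suf).map Prod.fst).Nodup := (List.nodup_cons.mp hcons).2
    have h0 : q0.1 ∉ (pre' ++ suf).map Prod.fst := (List.nodup_cons.mp hcons).1
    have hk' : k ∈ ((pre' ++ suf).map (pvPair q0)).map Prod.fst ∨
        k ∈ (combosUpto pre' suf).map Prod.fst := by
      simpa only [combosUpto, List.map_append, List.mem_append] using hk
    rcases hk' with hk1 | hk2
    · rw [List.map_map, List.mem_map] at hk1
      obtain ⟨r, hr, hkr⟩ := hk1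
      refine ⟨q0, List.mem_cons_self .., r, ?_, ?_, hkr.symm⟩
      · rcases List.mem_append.mp hr with h | h
        · exact List.mem_append.mpr (Or.inl (List.mem_cons_of_mem _ h))
        · exact List.mem_append.mpr (Or.inr h)
      · intro hEq
        exact h0 (hEq ▸ List.mem_map_of_mem hr)
    · obtain ⟨q, hq, r, hr, hne, hkk⟩ := ih hn' hk2
      refine ⟨q, List.mem_cons_of_mem _ hq, r, ?_, hne, hkk⟩
      rcases List.mem_append.mp hr with h | h
      · exact List.mem_append.mpr (Or.inl (List.mem_cons_of_mem _ h))
      · exact List.mem_append.mpr (Or.inr h)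

theorem inner_skip (p : String × List String) (l : List (String × List String))
    (dm : PySem.Dict String Int)
    (h : ∀ q ∈ l, p.1 = q.1 ∨ dm.contains (pvKey p.1 q.1) = true ∨ dm.contains (pvKey q.1 p.1) = true) :
    l.foldl (pvStepA p) dm = dm := by
  induction l with
  | nil => rfl
  | cons q l ih =>
    have hstep : pvStepA p dm q = dm := by
      unfold pvStepA
      rcases h q (List.mem_cons_self ..) with h1 | h1 | h1 <;> simp [h1]
    simp only [List.foldl_cons, hstep]
    exact ih (fun r hr => h r (List.mem_cons_of_mem _ hr))

theorem inner_insert_segment (p : String × List String) (l : List (String × List String))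
    (dm : PySem.Dict String Int)
    (hne : ∀ q ∈ l, p.1 ≠ q.1)
    (hfresh : ∀ q ∈ l, dm.contains (pvKey p.1 q.1) = false ∧ dm.contains (pvKey q.1 p.1) = false)
    (hnd : (l.map (fun q => pvKey p.1 q.1)).Nodup)
    (hrev : ∀ q ∈ l, ∀ q' ∈ l, pvKey q.1 p.1 ≠ pvKey p.1 q'.1) :
    (l.foldl (pvStepA p) dm).items = dm.items ++ l.map (pvPair p) := by
  induction l generalizing dm with
  | nil => simp
  | cons q l ih =>
    have hne0 : p.1 ≠ q.1 := hne q (List.mem_cons_self ..)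
    obtain ⟨hf1, hf2⟩ := hfresh q (List.mem_cons_self ..)
    have hstep : pvStepA p dm q = dm.insert (pvKey p.1 q.1) (pvCnt p.2 q.2) := by
      unfold pvStepA
      simp [hne0, hf1, hf2]
    have hqnotin : pvKey p.1 q.1 ∉ l.map (fun r => pvKey p.1 r.1) :=
      (List.nodup_cons.mp hnd).1
    have hih := ih (dm.insert (pvKey p.1 q.1) (pvCnt p.2 q.2))
      (fun r hr => hne r (List.mem_cons_of_mem _ hr))
      (fun r hr => by
        have hr' := hfresh r (List.mem_cons_of_mem _ hr)
        constructor
        · rw [PySem.Dict.contains_insert]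
          have : pvKey p.1 r.1 ≠ pvKey p.1 q.1 := by
            intro hEq
            exact hqnotin (hEq ▸ List.mem_map_of_mem hr)
          simp [this, hr'.1]
        · rw [PySem.Dict.contains_insert]
          have : pvKey r.1 p.1 ≠ pvKey p.1 q.1 :=
            hrev r (List.mem_cons_of_mem _ hr) q (List.mem_cons_self ..)
          simp [this, hr'.2])
      (List.nodup_cons.mp hnd).2
      (fun r hr r' hr' => hrev r (List.mem_cons_of_mem _ hr) r' (List.mem_cons_of_mem _ hr'))
    simp only [List.foldl_cons, hstep, hih,
      PySem.Dict.items_insert_of_not_contains _ _ hf1]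
    simp [pvPair]

theorem inner_full (dic : List (String × List String))
    (hinj : ∀ p ∈ dic, ∀ q ∈ dic, ∀ r ∈ dic, ∀ s ∈ dic,
      p.1 ≠ q.1 → r.1 ≠ s.1 → pvKey p.1 q.1 = pvKey r.1 s.1 → p.1 = r.1 ∧ q.1 = s.1)
    (hn : (dic.map Prod.fst).Nodup)
    (pre suf : List (String × List String)) (p : String × List String)
    (hd : dic = pre ++ p :: suf) :
    dic.foldl (pvStepA p) (PySem.Dict.mk (combosUpto pre (p :: suf)))
      = PySem.Dict.mk (combosUpto (pre ++ [p]) suf) := by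
  have hnames : (pre.map Prod.fst ++ p.1 :: suf.map Prod.fst).Nodup := by
    have hn' := hn
    rw [hd] at hn'
    simpa using hn'
  obtain ⟨hpre_nd, hcs, hdisj⟩ := List.nodup_append.mp hnames
  have hp_suf : ∀ q ∈ suf, p.1 ≠ q.1 := by
    intro q hq hEq
    exact (List.nodup_cons.mp hcs).1 (hEq ▸ List.mem_map_of_mem hq)
  have hsuf_nd : (suf.map Prod.fst).Nodup := (List.nodup_cons.mp hcs).2
  have hpre_p : p.1 ∉ pre.map Prod.fst := fun h =>
    hdisj _ h p.1 (List.mem_cons_self ..) rfl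
  have hpre_suf : ∀ q ∈ suf, q.1 ∉ pre.map Prod.fst := by
    intro q hq h
    exact hdisj _ h q.1 (List.mem_cons_of_mem _ (List.mem_map_of_mem hq)) rfl
  have hmem_p : p ∈ dic := by rw [hd]; simp
  have hmem_suf : ∀ q ∈ suf, q ∈ dic := by intro q hq; rw [hd]; simp [hq]
  have hmem_pre : ∀ q ∈ pre, q ∈ dic := by intro q hq; rw [hd]; simp [hq]
  -- the keys already present are exactly those keyed by a name from `pre`
  have hkeys : ∀ k, k ∈ (combosUpto pre (p :: suf)).map Prod.fst →
      ∃ a ∈ pre, ∃ b ∈ dic, a.1 ≠ b.1 ∧ k = pvKey a.1 b.1 := by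
    intro k hk
    obtain ⟨a, ha, b, hb, hab, hkk⟩ :=
      keys_combosUpto_sub pre (p :: suf) (by rw [← hd]; exact hn) k hk
    exact ⟨a, ha, b, hd ▸ hb, hab, hkk⟩
  have hfresh : ∀ q ∈ suf,
      (PySem.Dict.mk (combosUpto pre (p :: suf))).contains (pvKey p.1 q.1) = false ∧
      (PySem.Dict.mk (combosUpto pre (p :: suf))).contains (pvKey q.1 p.1) = false := by
    intro q hq
    constructor
    · rcases Bool.eq_false_or_eq_true
        ((PySem.Dict.mk (combosUpto pre (p :: suf))).contains (pvKey p.1 q.1)) with h | h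
      swap
      · exact h
      exfalso
      have hmem := (PySem.Dict.contains_iff_mem_keys _ _).mp h
      obtain ⟨a, ha, b, hb, hab, hkk⟩ := hkeys _ (by simpa using hmem)
      obtain ⟨h1, _⟩ := hinj p hmem_p q (hmem_suf q hq) a (hmem_pre a ha) b hb
        (hp_suf q hq) hab hkk
      exact hpre_p (h1 ▸ List.mem_map_of_mem ha)
    · rcases Bool.eq_false_or_eq_true
        ((PySem.Dict.mk (combosUpto pre (p :: suf))).contains (pvKey q.1 p.1)) with h | h
      swap
      · exact h
      exfalso
      have hmem := (PySem.Dict.contains_iff_mem_keys _ _).mp h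
      obtain ⟨a, ha, b, hb, hab, hkk⟩ := hkeys _ (by simpa using hmem)
      obtain ⟨h1, _⟩ := hinj q (hmem_suf q hq) p hmem_p a (hmem_pre a ha) b hb
        (fun hEq => hp_suf q hq hEq.symm) hab hkk
      exact hpre_suf q hq (h1 ▸ List.mem_map_of_mem ha)
  have hinjfst : ∀ x ∈ suf, ∀ y ∈ suf, x.1 = y.1 → x = y :=
    fun x hx y hy h => List.inj_on_of_nodup_map hsuf_nd hx hy h
  have hnd : (suf.map (fun q => pvKey p.1 q.1)).Nodup := by
    refine List.Nodup.map_on ?_ (hsuf_nd.of_map Prod.fst)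
    intro x hx y hy hEq
    obtain ⟨_, h2⟩ := hinj p hmem_p x (hmem_suf x hx) p hmem_p y (hmem_suf y hy)
      (hp_suf x hx) (hp_suf y hy) hEq
    exact hinjfst x hx y hy h2
  have hrev : ∀ q ∈ suf, ∀ q' ∈ suf, pvKey q.1 p.1 ≠ pvKey p.1 q'.1 := by
    intro q hq q' hq' hEq
    obtain ⟨h1, _⟩ := hinj q (hmem_suf q hq) p hmem_p p hmem_p q' (hmem_suf q' hq')
      (fun h => hp_suf q hq h.symm) (hp_suf q' hq') hEq
    exact hp_suf q hq h1.symm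
  -- run the inner loop: skip over `pre` and `p`, then insert a fresh key per element of `suf`
  have hsplit : dic.foldl (pvStepA p) (PySem.Dict.mk (combosUpto pre (p :: suf)))
      = suf.foldl (pvStepA p)
          (pvStepA p (pre.foldl (pvStepA p) (PySem.Dict.mk (combosUpto pre (p :: suf)))) p) := by
    rw [hd, List.foldl_append, List.foldl_cons]
  have hskip : pre.foldl (pvStepA p) (PySem.Dict.mk (combosUpto pre (p :: suf)))
      = PySem.Dict.mk (combosUpto pre (p :: suf)) := by
    apply inner_skip
    intro q hq
    refine Or.inr (Or.inr ((PySem.Dict.contains_iff_mem_keys _ _).mpr ?_))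
    have := mem_keys_combosUpto_of pre (p :: suf) q hq p (List.mem_cons_self ..)
    simpa using this
  have hself : pvStepA p (PySem.Dict.mk (combosUpto pre (p :: suf))) p
      = PySem.Dict.mk (combosUpto pre (p :: suf)) := by
    simp [pvStepA]
  rw [hsplit, hskip, hself]
  apply PySem.Dict.ext
  rw [inner_insert_segment p suf _ (hp_suf) hfresh hnd hrev]
  exact combosUpto_shift pre suf p

theorem outer_loop (dic : List (String × List String))
    (hn : (dic.map Prod.fst).Nodup)
    (hinj : ∀ p ∈ dic, ∀ q ∈ dic, ∀ r ∈ dic, ∀ s ∈ dic,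
      p.1 ≠ q.1 → r.1 ≠ s.1 → pvKey p.1 q.1 = pvKey r.1 s.1 → p.1 = r.1 ∧ q.1 = s.1) :
    ∀ (suf pre : List (String × List String)), pre ++ suf = dic →
    suf.foldl (fun dm p1 => dic.foldl (pvStepA p1) dm) (PySem.Dict.mk (combosUpto pre suf))
      = PySem.Dict.mk (pvCombos dic) := by
  intro suf
  induction suf with
  | nil =>
    intro pre h
    rw [List.append_nil] at h
    subst h
    simp only [List.foldl_nil, combosUpto_nil_right]
  | cons p suf' ih =>
    intro pre h
    simp only [List.foldl_cons]
    rw [inner_full dic hinj hn pre suf' p h.symm]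
    exact ih (pre ++ [p]) (by rw [List.append_assoc]; exact h)

theorem A_eq_combos (dic : List (String × List String))
    (hn : (dic.map Prod.fst).Nodup)
    (hinj : ∀ p ∈ dic, ∀ q ∈ dic, ∀ r ∈ dic, ∀ s ∈ dic,
      p.1 ≠ q.1 → r.1 ≠ s.1 → pvKey p.1 q.1 = pvKey r.1 s.1 → p.1 = r.1 ∧ q.1 = s.1) :
    match_employees dic = pvCombos dic := by
  unfold match_employees
  rw [show (PySem.Dict.empty : PySem.Dict String Int)
        = PySem.Dict.mk (combosUpto [] dic) from rfl]
  rw [outer_loop dic hn hinj dic [] rfl]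

----------------------------------------------------------------------
-- B-side: the inverted index + pair counter also yields pvCombos
----------------------------------------------------------------------

-- day incidences in employee order (one per distinct day of each employee)
def pvFlat (dic : List (String × List String)) : List (String × String) :=
  dic.flatMap (fun p => (PySem.Set.ofList p.2).map (fun d => (d, p.1)))

-- employees (in order) that work day c
def pvOcc (dic : List (String × List String)) (c : String) : List String :=
  (dic.filter (fun p => decide (c ∈ p.2))).map Prod.fst

-- number of (i, j) pairs with i < j, l[i] = x, l[j] = y
def pvPC (x y : String) : List String → Int
  | [] => 0
  | a :: t => (if a = x then (t.count y : Int) else 0) + pvPC x y t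

def pairKeys : List String → List String
  | [] => []
  | a :: t => t.map (pvKey a) ++ pairKeys t

def pvResList (counts : PySem.Dict (String × String) Int) : List String → List (String × Int)
  | [] => []
  | a :: t => t.map (fun b => (pvKey a b, counts.getD (a, b) 0)) ++ pvResList counts t

theorem dayEmps_eq (dic : List (String × List String)) (de : PySem.Dict String (List String)) :
    dic.foldl pvDayLoop de
      = (pvFlat dic).foldl (fun de q => de.modify q.1 [] (· ++ [q.2])) de := by
  simp [pvFlat, List.foldl_flatMap, List.foldl_map]
  rfl

theorem flat_filter (dic : List (String × List String)) (c : String) :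
    ((pvFlat dic).filter (fun q => q.1 == c)).map (·.2) = pvOcc dic c := by
  induction dic with
  | nil => rfl
  | cons p l ih =>
    simp only [pvFlat, List.flatMap_cons, List.filter_append, List.map_append] at *
    rw [ih]
    rw [List.filter_map]
    have hcomp : ((fun q : String × String => q.1 == c) ∘ fun d => (d, p.1)) = (fun d => d == c) := rfl
    rw [hcomp, List.filter_beq, List.map_map, List.map_replicate]
    by_cases hc : c ∈ PySem.Set.ofList p.2
    · have h1 : (PySem.Set.ofList p.2).count c = 1 := by
        rw [List.Nodup.count (PySem.Set.nodup_ofList p.2)]; simp [hc]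
      have hc2 : c ∈ p.2 := (PySem.Set.mem_ofList _ _).mp hc
      simp [h1, pvOcc, hc2]
    · have h1 : (PySem.Set.ofList p.2).count c = 0 := by
        rw [List.Nodup.count (PySem.Set.nodup_ofList p.2)]; simp [hc]
      have hc2 : c ∉ p.2 := fun h => hc ((PySem.Set.mem_ofList _ _).mpr h)
      simp [h1, pvOcc, hc2]

theorem dayEmps_getD (dic : List (String × List String)) (c : String) :
    (dic.foldl pvDayLoop PySem.Dict.empty).getD c [] = pvOcc dic c := by
  rw [dayEmps_eq, PySem.Dict.getD_foldl_modify_append, flat_filter]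
  simp

theorem dayEmps_keys (dic : List (String × List String)) :
    (dic.foldl pvDayLoop PySem.Dict.empty).keys
      = PySem.Set.ofList ((pvFlat dic).map (·.1)) := by
  rw [dayEmps_eq, PySem.Dict.keys_foldl_modify_key]
  simp [PySem.Set.update_nil_left, PySem.Dict.keys_empty]

theorem mem_flat_fst (dic : List (String × List String)) (c : String) :
    c ∈ (pvFlat dic).map (·.1) ↔ ∃ p ∈ dic, c ∈ p.2 := by
  simp [pvFlat, PySem.Set.mem_ofList]

theorem dayEmps_values (dic : List (String × List String)) :
    (dic.foldl pvDayLoop PySem.Dict.empty).values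
      = (PySem.Set.ofList ((pvFlat dic).map (·.1))).map (pvOcc dic) := by
  have hnd : (dic.foldl pvDayLoop PySem.Dict.empty).keys.Nodup := by
    rw [dayEmps_keys]; exact PySem.Set.nodup_ofList _
  rw [PySem.Dict.values_eq_map_keys _ hnd ([] : List String), dayEmps_keys]
  exact List.map_congr_left (fun d _ => dayEmps_getD dic d)

theorem bump_getD (a x y : String) (t : List String) (c : PySem.Dict (String × String) Int) :
    (t.foldl (fun c b => c.insert (a, b) (c.getD (a, b) 0 + 1)) c).getD (x, y) 0
      = c.getD (x, y) 0 + (if a = x then (t.count y : Int) else 0) := by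
  induction t generalizing c with
  | nil => simp
  | cons b t ih =>
    rw [List.foldl_cons, ih, PySem.Dict.getD_insert]
    by_cases hp : (x, y) = (a, b)
    · obtain ⟨hx, hy⟩ := Prod.mk.injEq .. ▸ hp
      subst hx; subst hy
      simp [List.count_cons]
      push_cast
      ring
    · rw [if_neg hp]
      by_cases hax : a = x
      · subst hax
        have hby : y ≠ b := fun h => hp (by simp [h])
        simp [List.count_cons, hby, Ne.symm hby]
      · simp [hax]

theorem countPairs_getD (x y : String) (emps : List String)
    (c : PySem.Dict (String × String) Int) :
    (pvCountPairs c emps).getD (x, y) 0 = c.getD (x, y) 0 + pvPC x y emps := by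
  induction emps generalizing c with
  | nil => simp [pvCountPairs, pvPC]
  | cons a t ih =>
    rw [pvCountPairs, ih, bump_getD, pvPC]
    ring

theorem counts_getD (x y : String) (L : List (List String))
    (c : PySem.Dict (String × String) Int) :
    (L.foldl pvCountPairs c).getD (x, y) 0
      = c.getD (x, y) 0 + (L.map (pvPC x y)).sum := by
  induction L generalizing c with
  | nil => simp
  | cons e L ih =>
    rw [List.foldl_cons, ih, countPairs_getD]
    simp
    ring

theorem pvPC_append (x y : String) (u v : List String) :
    pvPC x y (u ++ v) = pvPC x y u + (u.count x : Int) * (v.count y : Int) + pvPC x y v := by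
  induction u with
  | nil => simp [pvPC]
  | cons a u ih =>
    rw [List.cons_append, pvPC, ih, pvPC]
    by_cases hax : a = x
    · simp only [hax, List.count_append, List.count_cons_self]
      push_cast
      ring
    · simp only [if_neg hax, List.count_cons]
      have : ¬ (a = x) := hax
      simp [this]

theorem pvPC_zero (x y : String) (l : List String) (h : x ∉ l) : pvPC x y l = 0 := by
  induction l with
  | nil => rfl
  | cons a t ih =>
    rw [pvPC]
    have : a ≠ x := fun hh => h (hh ▸ List.mem_cons_self ..)
    rw [if_neg this, ih (fun hm => h (List.mem_cons_of_mem _ hm))]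
    ring

theorem mem_occ (l : List (String × List String)) (d z : String) (h : z ∈ pvOcc l d) :
    z ∈ l.map Prod.fst := by
  simp only [pvOcc, List.mem_map, List.mem_filter] at h
  obtain ⟨p, ⟨hp, _⟩, rfl⟩ := h
  exact List.mem_map_of_mem hp

theorem occ_count (l : List (String × List String)) (d : String)
    (hn : (l.map Prod.fst).Nodup) (q : String × List String) (hq : q ∈ l) :
    (pvOcc l d).count q.1 = if d ∈ q.2 then 1 else 0 := by
  induction l with
  | nil => cases hq
  | cons r t ih =>
    have hnc : (r.1 :: t.map Prod.fst).Nodup := by rw [List.map_cons] at hn; exact hn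
    have hcons := List.nodup_cons.mp hnc
    have hrt : r.1 ∉ t.map Prod.fst := hcons.1
    have hnt : (t.map Prod.fst).Nodup := hcons.2
    have hocc : pvOcc (r :: t) d
        = (if d ∈ r.2 then [r.1] else []) ++ pvOcc t d := by
      by_cases hr : d ∈ r.2 <;> simp [pvOcc, hr]
    rw [hocc, List.count_append]
    rcases List.mem_cons.mp hq with h | h
    · subst h
      have hnotin : q.1 ∉ pvOcc t d := fun hm => hrt (mem_occ t d q.1 hm)
      rw [List.count_eq_zero.mpr hnotin]
      by_cases hr : d ∈ q.2 <;> simp [hr]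
    · have hne : r.1 ≠ q.1 := fun hEq => hrt (hEq ▸ List.mem_map_of_mem h)
      rw [ih hnt h]
      have hz : List.count q.1 (if d ∈ r.2 then [r.1] else []) = 0 := by
        by_cases hr : d ∈ r.2 <;>
          simp [hr, List.count_eq_zero, Ne.symm hne]
      rw [hz, Nat.zero_add]

theorem occ_day (l1 l2 : List (String × List String)) (p q : String × List String) (d : String)
    (hn : (((l1 ++ p :: l2)).map Prod.fst).Nodup) (hq : q ∈ l2) :
    pvPC p.1 q.1 (pvOcc (l1 ++ p :: l2) d) = if d ∈ p.2 ∧ d ∈ q.2 then 1 else 0 := by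
  have hn' : (l1.map Prod.fst ++ p.1 :: l2.map Prod.fst).Nodup := by
    rw [List.map_append, List.map_cons] at hn; exact hn
  obtain ⟨h1, h2, hdisj⟩ := List.nodup_append.mp hn'
  have hpnotl1 : p.1 ∉ l1.map Prod.fst := fun h => hdisj _ h p.1 (List.mem_cons_self ..) rfl
  have hpnotl2 : p.1 ∉ l2.map Prod.fst := (List.nodup_cons.mp h2).1
  have hn2 : (l2.map Prod.fst).Nodup := (List.nodup_cons.mp h2).2
  -- decompose occ over the append
  have hocc_app : ∀ (u v : List (String × List String)) (c : String),
      pvOcc (u ++ v) c = pvOcc u c ++ pvOcc v c := by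
    intro u v c; simp [pvOcc, List.filter_append]
  have hocc_cons : pvOcc (p :: l2) d = (if d ∈ p.2 then [p.1] else []) ++ pvOcc l2 d := by
    by_cases hr : d ∈ p.2 <;> simp [pvOcc, hr]
  rw [hocc_app, hocc_cons]
  have hnotu : p.1 ∉ pvOcc l1 d := fun h => hpnotl1 (mem_occ _ _ _ h)
  have hnotw : p.1 ∉ pvOcc l2 d := fun h => hpnotl2 (mem_occ _ _ _ h)
  rw [pvPC_append]
  rw [pvPC_zero _ _ _ hnotu, List.count_eq_zero.mpr hnotu]
  have hcnt : (pvOcc l2 d).count q.1 = if d ∈ q.2 then 1 else 0 := occ_count l2 d hn2 q hq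
  by_cases hp2 : d ∈ p.2
  · rw [if_pos hp2]
    rw [show ([p.1] ++ pvOcc l2 d) = p.1 :: pvOcc l2 d from rfl]
    rw [pvPC]
    rw [if_pos rfl, pvPC_zero _ _ _ hnotw, hcnt]
    by_cases hq2 : d ∈ q.2 <;> simp [hp2, hq2]
  · rw [if_neg hp2]
    simp only [List.nil_append]
    rw [pvPC_zero _ _ _ hnotw]
    simp [hp2]

-- |{d : d ∈ p.2 ∧ d ∈ q.2}| summed over the distinct days = A's intersection size
theorem counts_eq_cnt (dic l1 l2 : List (String × List String)) (p q : String × List String)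
    (hn : (dic.map Prod.fst).Nodup) (hd : dic = l1 ++ p :: l2) (hq : q ∈ l2) :
    (((dic.foldl pvDayLoop PySem.Dict.empty).values).foldl pvCountPairs
        PySem.Dict.empty).getD (p.1, q.1) 0 = pvCnt p.2 q.2 := by
  rw [counts_getD, PySem.Dict.getD_empty, dayEmps_values, List.map_map]
  have hper : ∀ d ∈ PySem.Set.ofList ((pvFlat dic).map (·.1)),
      (pvPC p.1 q.1 ∘ pvOcc dic) d = if (decide (d ∈ p.2) && decide (d ∈ q.2)) = true then (1:Int) else 0 := by
    intro d _
    have := occ_day l1 l2 p q d (hd ▸ hn) hq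
    simp only [Function.comp_apply, hd, this]
    by_cases h1 : d ∈ p.2 <;> by_cases h2 : d ∈ q.2 <;> simp [h1, h2]
  rw [List.map_congr_left hper, PySem.List.sum_map_ite_one_zero, List.countP_eq_length_filter]
  -- both sides are the length of a Nodup list with membership d ∈ p.2 ∧ d ∈ q.2
  have hmemp : p ∈ dic := by rw [hd]; simp
  have hK := PySem.Set.nodup_ofList ((pvFlat dic).map (·.1))
  have h1 : ((PySem.Set.ofList ((pvFlat dic).map (·.1))).filter
      (fun d => decide (d ∈ p.2) && decide (d ∈ q.2))).Perm
      (PySem.Set.inter (PySem.Set.ofList p.2) (PySem.Set.ofList q.2)) := by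
    apply (List.perm_ext_iff_of_nodup (hK.filter _)
      (PySem.Set.nodup_inter _ _ (PySem.Set.nodup_ofList _))).mpr
    intro z
    simp only [List.mem_filter, PySem.Set.mem_inter, PySem.Set.mem_ofList]
    constructor
    · rintro ⟨_, hz⟩
      simpa using hz
    · rintro ⟨hz1, hz2⟩
      refine ⟨?_, by simp [hz1, hz2]⟩
      exact (mem_flat_fst dic z).mpr ⟨p, hmemp, hz1⟩
  rw [h1.length_eq]
  show _ = PySem.Set.len _
  rw [PySem.Set.len]
  omega

theorem buildRes_items (counts : PySem.Dict (String × String) Int)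
    (names : List String) : ∀ (r : PySem.Dict String Int),
    (pairKeys names).Nodup →
    (∀ k ∈ pairKeys names, r.contains k = false) →
    (pvBuildRes counts r names).items = r.items ++ pvResList counts names := by
  induction names with
  | nil => intro r _ _; simp [pvBuildRes, pvResList]
  | cons a t ih =>
    intro r hnd hfresh
    have hsplit : pairKeys (a :: t) = t.map (pvKey a) ++ pairKeys t := rfl
    rw [hsplit] at hnd hfresh
    obtain ⟨hnd1, hnd2, hdisj⟩ := List.nodup_append.mp hnd
    have hfold := PySem.Dict.items_foldl_insert_fresh t (pvKey a)
      (fun b => counts.getD (a, b) 0) r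
      (fun b hb => hfresh _ (List.mem_append.mpr (Or.inl (List.mem_map_of_mem hb))))
      hnd1
    rw [pvBuildRes]
    rw [ih _ hnd2 ?fresh]
    · rw [hfold, pvResList, List.append_assoc]
    case fresh =>
      intro k hk
      have hkeys := PySem.Dict.keys_foldl_insert_key t (pvKey a)
        (fun r b => counts.getD (a, b) 0) r
      have hnotr : k ∉ r.keys := by
        intro hm
        have h1 := hfresh k (List.mem_append.mpr (Or.inr hk))
        have h2 := (PySem.Dict.contains_iff_mem_keys r k).mpr hm
        rw [h1] at h2
        cases h2
      have hnotm : k ∉ t.map (pvKey a) := fun hm => hdisj _ hm k hk rfl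
      rcases Bool.eq_false_or_eq_true ((t.foldl (fun r b => r.insert (pvKey a b) (counts.getD (a, b) 0)) r).contains k) with h | h
      swap
      · exact h
      exfalso
      have := (PySem.Dict.contains_iff_mem_keys _ _).mp h
      rw [hkeys] at this
      rcases (PySem.Set.mem_update _ _ _).mp this with h' | h'
      · exact hnotr h'
      · exact hnotm h'

theorem mem_pairKeys (names : List String) (k : String) (hn : names.Nodup)
    (hk : k ∈ pairKeys names) :
    ∃ c ∈ names, ∃ e ∈ names, c ≠ e ∧ k = pvKey c e := by
  induction names with
  | nil => cases hk
  | cons a t ih =>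
    obtain ⟨hna, hnt⟩ := List.nodup_cons.mp hn
    rcases List.mem_append.mp hk with h | h
    · obtain ⟨b, hb, rfl⟩ := List.mem_map.mp h
      exact ⟨a, List.mem_cons_self .., b, List.mem_cons_of_mem _ hb,
        fun hEq => hna (hEq ▸ hb), rfl⟩
    · obtain ⟨c, hc, e, he, hne, hkk⟩ := ih hnt h
      exact ⟨c, List.mem_cons_of_mem _ hc, e, List.mem_cons_of_mem _ he, hne, hkk⟩

theorem pairKeys_nodup (names : List String) (hn : names.Nodup)
    (hinj : ∀ a ∈ names, ∀ b ∈ names, ∀ c ∈ names, ∀ e ∈ names,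
      a ≠ b → c ≠ e → pvKey a b = pvKey c e → a = c ∧ b = e) :
    (pairKeys names).Nodup := by
  induction names with
  | nil => exact List.nodup_nil
  | cons a t ih =>
    obtain ⟨hna, hnt⟩ := List.nodup_cons.mp hn
    rw [show pairKeys (a :: t) = t.map (pvKey a) ++ pairKeys t from rfl]
    refine List.nodup_append.mpr ⟨?_, ?_, ?_⟩
    · refine List.Nodup.map_on ?_ hnt
      intro b1 h1 b2 h2 hEq
      exact (hinj a (List.mem_cons_self ..) b1 (List.mem_cons_of_mem _ h1)
        a (List.mem_cons_self ..) b2 (List.mem_cons_of_mem _ h2)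
        (fun hh => hna (hh ▸ h1)) (fun hh => hna (hh ▸ h2)) hEq).2
    · exact ih hnt (fun x hx y hy c hc e he => hinj x (List.mem_cons_of_mem _ hx)
        y (List.mem_cons_of_mem _ hy) c (List.mem_cons_of_mem _ hc) e (List.mem_cons_of_mem _ he))
    · intro k hk1 k' hk2 hEq
      subst hEq
      obtain ⟨b, hb, rfl⟩ := List.mem_map.mp hk1
      obtain ⟨c, hc, e, he, hne, hkk⟩ := mem_pairKeys t _ hnt hk2
      obtain ⟨h1, _⟩ := hinj a (List.mem_cons_self ..) b (List.mem_cons_of_mem _ hb)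
        c (List.mem_cons_of_mem _ hc) e (List.mem_cons_of_mem _ he)
        (fun hh => hna (hh ▸ hb)) hne hkk
      exact hna (h1 ▸ hc)

theorem resList_eq_combos (dic : List (String × List String))
    (hn : (dic.map Prod.fst).Nodup) :
    ∀ (rest l1 : List (String × List String)), dic = l1 ++ rest →
    pvResList (((dic.foldl pvDayLoop PySem.Dict.empty).values).foldl pvCountPairs
        PySem.Dict.empty) (rest.map Prod.fst) = pvCombos rest := by
  intro rest
  induction rest with
  | nil => intro l1 _; rfl
  | cons p r' ih =>
    intro l1 hd
    rw [List.map_cons]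
    rw [show pvResList _ (p.1 :: r'.map Prod.fst)
        = (r'.map Prod.fst).map (fun b => (pvKey p.1 b,
            (((dic.foldl pvDayLoop PySem.Dict.empty).values).foldl pvCountPairs
              PySem.Dict.empty).getD (p.1, b) 0)) ++ pvResList _ (r'.map Prod.fst) from rfl]
    rw [pvCombos, ih (l1 ++ [p]) (by rw [hd, List.append_assoc]; rfl), List.map_map]
    congr 1
    apply List.map_congr_left
    intro q hq
    simp only [Function.comp_apply, pvPair]
    rw [counts_eq_cnt dic l1 r' p q hn hd hq]

theorem B_eq_combos (dic : List (String × List String))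
    (hn : (dic.map Prod.fst).Nodup)
    (hinj : ∀ p ∈ dic, ∀ q ∈ dic, ∀ r ∈ dic, ∀ s ∈ dic,
      p.1 ≠ q.1 → r.1 ≠ s.1 → pvKey p.1 q.1 = pvKey r.1 s.1 → p.1 = r.1 ∧ q.1 = s.1) :
    (pvBuildRes (((dic.foldl pvDayLoop PySem.Dict.empty).values).foldl pvCountPairs
        PySem.Dict.empty) PySem.Dict.empty (dic.map Prod.fst)).items = pvCombos dic := by
  have hnN : (dic.map Prod.fst).Nodup := hn
  have hinjN : ∀ a ∈ dic.map Prod.fst, ∀ b ∈ dic.map Prod.fst, ∀ c ∈ dic.map Prod.fst,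
      ∀ e ∈ dic.map Prod.fst, a ≠ b → c ≠ e → pvKey a b = pvKey c e → a = c ∧ b = e := by
    intro a ha b hb c hc e he
    obtain ⟨pa, hpa, rfl⟩ := List.mem_map.mp ha
    obtain ⟨pb, hpb, rfl⟩ := List.mem_map.mp hb
    obtain ⟨pc, hpc, rfl⟩ := List.mem_map.mp hc
    obtain ⟨pe, hpe, rfl⟩ := List.mem_map.mp he
    exact hinj pa hpa pb hpb pc hpc pe hpe
  rw [buildRes_items _ _ _ (pairKeys_nodup _ hnN hinjN)
      (fun k _ => PySem.Dict.contains_empty k)]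
  rw [show (PySem.Dict.empty : PySem.Dict String Int).items = [] from rfl, List.nil_append]
  exact resList_eq_combos dic hn dic [] rfl

theorem B_eq_combos_alt (dic : List (String × List String))
    (hn : (dic.map Prod.fst).Nodup)
    (hinj : ∀ p ∈ dic, ∀ q ∈ dic, ∀ r ∈ dic, ∀ s ∈ dic,
      p.1 ≠ q.1 → r.1 ≠ s.1 → pvKey p.1 q.1 = pvKey r.1 s.1 → p.1 = r.1 ∧ q.1 = s.1) :
    match_employees_alt dic = pvCombos dic := by
  show (pvBuildRes _ PySem.Dict.empty (dic.map Prod.fst)).items = _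
  exact B_eq_combos dic hn hinj

-- ===== VERDICT (by name: the statement is the Claim_ definition above) =====
theorem match_employees_spec : Claim_equal_match_employees := by
  intro dic _ hpre
  obtain ⟨hn, hinj⟩ := hpre
  show match_employees dic = match_employees_alt dic
  rw [A_eq_combos dic hn hinj, B_eq_combos_alt dic hn hinj]
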